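-- pv_equiv track=rewrite | github.com/pranavputtagunta/Buck-It | backend/routers/buckets.py | _score_bucket_for_user
-- ===== SOURCE A (Python) =====
-- def _tokenize_interest_text(value: str) -> set[str]:
--     normalized = "".join(char.lower() if char.isalnum() else " " for char in value)
--     return {token for token in normalized.split() if len(token) >= 3}
--
-- def _score_bucket_for_user(bucket: dict, bucket_list_titles: list[str]) -> int:
--     bucket_tokens = _tokenize_interest_text(f"{bucket.get('title', '')} {bucket.get('category', '')}")
--     score = 0
--
--     for title in bucket_list_titles:
--         title_tokens = _tokenize_interest_text(title)
--         if not title_tokens: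
--             continue
--         overlap = bucket_tokens.intersection(title_tokens)
--         score += len(overlap)
--
--     return score
-- ===== SOURCE B (Python) =====
-- def _score_bucket_for_user(bucket: dict, bucket_list_titles: list[str]) -> int:
--     def tokens_of(value: str) -> set[str]:
--         # single character scan: accumulate lowercase alnum runs, emit runs of length >= 3
--         tokens = set()
--         cur = ""
--         for ch in value:
--             if ch.isalnum():
--                 cur += ch.lower()
--             else:
--                 if len(cur) >= 3:
--                     tokens.add(cur)
--                 cur = ""
--         if len(cur) >= 3:
--             tokens.add(cur)
--         return tokens
--
--     bucket_tokens = tokens_of(bucket.get("title", "") + " " + bucket.get("category", ""))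
--     title_sets = [tokens_of(title) for title in bucket_list_titles]
--     return sum(1 for token in bucket_tokens for s in title_sets if token in s)
-- ===== Notes on version B (the rewrite author's own statement) =====
-- stated objective: alternative
-- what changed: B tokenizes with a single character scan that accumulates lowercase alnum runs directly (instead of A's normalize-join-then-split) and computes the score with swapped loops: it precomputes all title token sets once, then for each bucket token counts the title sets containing it, instead of A's per-title set intersection.
import Mathlib
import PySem

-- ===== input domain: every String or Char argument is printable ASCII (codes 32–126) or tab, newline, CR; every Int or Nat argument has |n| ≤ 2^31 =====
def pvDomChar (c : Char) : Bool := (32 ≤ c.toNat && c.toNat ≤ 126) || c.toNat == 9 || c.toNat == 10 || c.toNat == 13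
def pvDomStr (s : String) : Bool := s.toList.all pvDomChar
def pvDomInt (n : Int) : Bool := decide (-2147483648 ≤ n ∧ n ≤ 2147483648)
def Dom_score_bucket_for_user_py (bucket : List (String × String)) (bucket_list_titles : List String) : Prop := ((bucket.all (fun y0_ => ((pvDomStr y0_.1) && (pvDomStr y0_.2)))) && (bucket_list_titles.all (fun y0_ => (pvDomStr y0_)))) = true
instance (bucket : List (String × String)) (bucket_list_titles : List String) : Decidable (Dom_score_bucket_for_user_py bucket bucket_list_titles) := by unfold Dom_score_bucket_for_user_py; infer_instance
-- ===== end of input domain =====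

-- B replaces A's normalize-then-split tokenizer by a single character scan that emits lowercase
-- alnum runs directly, and replaces the per-title set intersections by counting, for each bucket
-- token, the precomputed title token sets containing it (alternative decomposition, same exact result).


-- ===== PORT A =====
-- _tokenize_interest_text of Source A: normalize (lower alnum, blank the rest), split, keep len >= 3
def pvTokenize (value : List Char) : PySem.Set (List Char) :=
  let normalized := value.map (fun c => if PySem.Chars.isalnum c then PySem.Chars.lowerChar c else ' ')
  PySem.Set.ofList ((PySem.Chars.split₀ normalized).filter (fun t => 3 ≤ t.length))

def score_bucket_for_user_py (bucket : List (String × String)) (bucket_list_titles : List String) : Int :=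
  let bucket_tokens := pvTokenize ((PySem.Dict.getD ⟨bucket⟩ "title" "").toList ++ [' '] ++ (PySem.Dict.getD ⟨bucket⟩ "category" "").toList)
  bucket_list_titles.foldl (fun score title =>
    let title_tokens := pvTokenize title.toList
    if title_tokens.isEmpty then score
    else score + PySem.Set.len (PySem.Set.inter bucket_tokens title_tokens)) 0

-- ===== PORT B =====
-- Source B's tokens_of: one scan over the chars, cur = current lowercase alnum run, flush runs of length >= 3
def pvScanTokens : List Char → List Char → PySem.Set (List Char) → PySem.Set (List Char)
  | [], cur, tokens => if 3 ≤ cur.length then tokens.add cur else tokens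
  | ch :: rest, cur, tokens =>
      if PySem.Chars.isalnum ch then
        pvScanTokens rest (cur ++ [PySem.Chars.lowerChar ch]) tokens
      else
        pvScanTokens rest [] (if 3 ≤ cur.length then tokens.add cur else tokens)

def pvTokensOf (value : List Char) : PySem.Set (List Char) :=
  pvScanTokens value [] PySem.Set.empty

def score_bucket_for_user_py_alt (bucket : List (String × String)) (bucket_list_titles : List String) : Int :=
  let bucket_tokens := pvTokensOf ((PySem.Dict.getD ⟨bucket⟩ "title" "").toList ++ [' '] ++ (PySem.Dict.getD ⟨bucket⟩ "category" "").toList)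
  let title_sets := bucket_list_titles.map (fun title => pvTokensOf title.toList)
  bucket_tokens.foldl (fun acc token => acc + ((title_sets.countP (fun s => s.contains token) : Nat) : Int)) 0

-- ===== PRECONDITION & SPEC =====
def Spec_score_bucket_for_user_py (bucket : List (String × String)) (bucket_list_titles : List String) (out : Int) : Prop := out = score_bucket_for_user_py_alt bucket bucket_list_titles
instance (bucket : List (String × String)) (bucket_list_titles : List String) (out : Int) : Decidable (Spec_score_bucket_for_user_py bucket bucket_list_titles out) := by unfold Spec_score_bucket_for_user_py; infer_instance

-- ===== CLAIM (what is proved, stated in full; the proofs are below) =====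
def Claim_equal_score_bucket_for_user_py : Prop := ∀ (bucket : List (String × String)) (bucket_list_titles : List String), Dom_score_bucket_for_user_py bucket bucket_list_titles → Spec_score_bucket_for_user_py bucket bucket_list_titles (score_bucket_for_user_py bucket bucket_list_titles)

-- ===== LEMMAS AND PROOFS =====

-- split₀.go's accumulator holds already-finished tokens (reversed list): it is a prefix of the result
theorem go_acc (s : List Char) : ∀ (cur : List Char) (acc : List (List Char)),
    PySem.Chars.split₀.go s cur acc = acc.reverse ++ PySem.Chars.split₀.go s cur [] := by
  induction s with
  | nil =>
      intro cur acc
      simp only [PySem.Chars.split₀.go]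
      split_ifs <;> simp
  | cons c rest ih =>
      intro cur acc
      simp only [PySem.Chars.split₀.go]
      split_ifs with h1 h2
      · exact ih [] acc
      · rw [ih [] (cur.reverse :: acc), ih [] [cur.reverse]]
        simp
      · exact ih (c :: cur) acc

theorem notspace (d : Char) (h1 : 48 ≤ d.toNat) (h2 : d.toNat ≤ 122) :
    PySem.Chars.isspace d = false := by
  simp only [PySem.Chars.isspace]
  simp only [Bool.or_eq_false_iff, Bool.and_eq_false_iff, decide_eq_false_iff_not]
  omega

-- the lowercase form of an alphanumeric char is never whitespace
theorem lower_alnum_not_space (c : Char) (h : PySem.Chars.isalnum c = true) :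
    PySem.Chars.isspace (PySem.Chars.lowerChar c) = false := by
  have eA : ('A').val.toNat = 65 := rfl
  have eZ : ('Z').val.toNat = 90 := rfl
  have ea : ('a').val.toNat = 97 := rfl
  have ez : ('z').val.toNat = 122 := rfl
  have e0 : ('0').val.toNat = 48 := rfl
  have e9 : ('9').val.toNat = 57 := rfl
  have ec : c.toNat = c.val.toNat := rfl
  simp only [PySem.Chars.isalnum, PySem.Chars.isalpha, PySem.Chars.isupper, PySem.Chars.islower,
    PySem.Chars.isdigit, Bool.or_eq_true, Bool.and_eq_true, decide_eq_true_eq, Char.le_def,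
    UInt32.le_iff_toNat_le, eA, eZ, ea, ez, e0, e9] at h
  unfold PySem.Chars.lowerChar PySem.Chars.isupper
  split_ifs with hu
  · simp only [Bool.and_eq_true, decide_eq_true_eq, Char.le_def, UInt32.le_iff_toNat_le,
      eA, eZ] at hu
    apply notspace
    · rw [Char.toNat_ofNat, if_pos (Or.inl (by rw [ec]; omega))]; rw [ec]; omega
    · rw [Char.toNat_ofNat, if_pos (Or.inl (by rw [ec]; omega))]; rw [ec]; omega
  · simp only [Bool.and_eq_true, decide_eq_true_eq, Char.le_def, UInt32.le_iff_toNat_le,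
      eA, eZ, not_and, not_le] at hu
    exact notspace c (by rw [ec]; omega) (by rw [ec]; omega)

-- folding the filtered token list of one flushed run into the set = B's flush step
theorem fold_flush (cur : List Char) (tokens : PySem.Set (List Char)) :
    List.foldl PySem.Set.add tokens
      ((if cur = [] then ([] : List (List Char)) else [cur]).filter (fun t => 3 ≤ t.length))
    = if 3 ≤ cur.length then tokens.add cur else tokens := by
  by_cases hc : cur = []
  · subst hc; simp
  · simp only [if_neg hc]
    by_cases h3 : 3 ≤ cur.length
    · simp [List.filter, h3]
    · simp [List.filter, h3]

-- B's scanner computes exactly A's set: add the filtered split tokens of the normalized suffix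
theorem scan_eq (l : List Char) : ∀ (cur : List Char) (tokens : PySem.Set (List Char)),
    pvScanTokens l cur tokens
      = List.foldl PySem.Set.add tokens
          ((PySem.Chars.split₀.go
              (l.map (fun c => if PySem.Chars.isalnum c then PySem.Chars.lowerChar c else ' '))
              cur.reverse []).filter (fun t => 3 ≤ t.length)) := by
  induction l with
  | nil =>
      intro cur tokens
      simp only [pvScanTokens, List.map_nil, PySem.Chars.split₀.go]
      have : (if cur.reverse.isEmpty = true then ([] : List (List Char)).reverse
          else (cur.reverse.reverse :: ([] : List (List Char))).reverse)
          = if cur = [] then ([] : List (List Char)) else [cur] := by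
        by_cases hc : cur = [] <;> simp [hc]
      rw [this, fold_flush]
  | cons c rest ih =>
      intro cur tokens
      simp only [pvScanTokens, List.map_cons]
      by_cases ha : PySem.Chars.isalnum c = true
      · rw [if_pos ha]
        simp only [ha, if_true]
        rw [ih (cur ++ [PySem.Chars.lowerChar c]) tokens]
        simp only [PySem.Chars.split₀.go, lower_alnum_not_space c ha, Bool.false_eq_true,
          if_false, List.reverse_append, List.reverse_cons, List.reverse_nil, List.nil_append,
          List.singleton_append]
      · rw [if_neg ha]
        simp only [ha, Bool.false_eq_true, if_false]
        rw [ih [] (if 3 ≤ cur.length then tokens.add cur else tokens)]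
        have hsp : PySem.Chars.isspace ' ' = true := by decide
        simp only [PySem.Chars.split₀.go, hsp, if_true]
        have hgo : (if cur.reverse.isEmpty = true
              then PySem.Chars.split₀.go
                (rest.map (fun c => if PySem.Chars.isalnum c then PySem.Chars.lowerChar c else ' ')) [] []
              else PySem.Chars.split₀.go
                (rest.map (fun c => if PySem.Chars.isalnum c then PySem.Chars.lowerChar c else ' '))
                [] [cur.reverse.reverse])
            = (if cur = [] then ([] : List (List Char)) else [cur]) ++
              PySem.Chars.split₀.go
                (rest.map (fun c => if PySem.Chars.isalnum c then PySem.Chars.lowerChar c else ' ')) [] [] := by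
          by_cases hc : cur = []
          · simp [hc]
          · have hre : cur.reverse.isEmpty = false := by simp [hc]
            simp only [hre, Bool.false_eq_true, if_false, List.reverse_reverse, hc]
            rw [go_acc _ [] [cur]]
            simp
        simp only [List.reverse_nil]
        rw [hgo, List.filter_append, List.foldl_append, fold_flush]

-- the two tokenizers agree
theorem tokens_eq (l : List Char) : pvTokensOf l = pvTokenize l := by
  unfold pvTokensOf pvTokenize PySem.Chars.split₀
  rw [scan_eq l [] PySem.Set.empty]
  rfl

-- the double count exchanged: per title-set counts over bt = per bucket-token counts over the sets
theorem exchange (bt : List (List Char)) (S : List (List (List Char))) :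
    (S.map (fun tt => ((bt.countP (fun t => tt.contains t) : Nat) : Int))).sum
      = (bt.map (fun t => ((S.countP (fun tt => tt.contains t) : Nat) : Int))).sum := by
  induction S with
  | nil => simp
  | cons tt S ih =>
      simp only [List.map_cons, List.sum_cons, List.countP_cons]
      have : (fun t => (((S.countP (fun tt => tt.contains t) +
              if tt.contains t = true then 1 else 0 : Nat)) : Int))
          = fun t => ((S.countP (fun tt => tt.contains t) : Nat) : Int) +
              (if tt.contains t = true then (1 : Int) else 0) := by
        funext t; split_ifs <;> push_cast <;> ring
      rw [this, PySem.List.sum_map_add_int, PySem.List.sum_map_ite_one_zero, ih]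
      ring

-- A's guarded loop body is a plain additive contribution: the overlap count of this title's set
theorem a_body (bt : List (List Char)) :
    (fun (score : Int) (title : String) =>
        let title_tokens := pvTokenize title.toList
        if title_tokens.isEmpty then score
        else score + PySem.Set.len (PySem.Set.inter bt title_tokens))
      = fun (score : Int) (title : String) =>
          score + ((bt.countP (fun t => (pvTokenize title.toList).contains t) : Nat) : Int) := by
  funext score title
  simp only [PySem.Set.len, PySem.Set.inter, List.countP_eq_length_filter]
  by_cases he : (pvTokenize title.toList).isEmpty = true
  · have h0 : pvTokenize title.toList = [] := List.isEmpty_iff.mp he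
    simp [h0]
  · simp [he]

theorem loops_eq (bt : List (List Char)) (titles : List String) :
    (titles.foldl (fun score title =>
        let title_tokens := pvTokenize title.toList
        if title_tokens.isEmpty then score
        else score + PySem.Set.len (PySem.Set.inter bt title_tokens)) 0)
    = bt.foldl (fun acc token =>
        acc + (((titles.map (fun title => pvTokenize title.toList)).countP
                  (fun s => s.contains token) : Nat) : Int)) 0 := by
  rw [a_body bt, PySem.List.foldl_add, PySem.List.foldl_add]
  simp only [zero_add]
  rw [show (titles.map (fun title =>
        ((bt.countP (fun t => (pvTokenize title.toList).contains t) : Nat) : Int)))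
      = ((titles.map (fun title => pvTokenize title.toList)).map
          (fun tt => ((bt.countP (fun t => tt.contains t) : Nat) : Int))) from by
        rw [List.map_map]; rfl]
  exact exchange bt (titles.map (fun title => pvTokenize title.toList))

theorem score_eq (bucket : List (String × String)) (titles : List String) :
    score_bucket_for_user_py bucket titles = score_bucket_for_user_py_alt bucket titles := by
  unfold score_bucket_for_user_py score_bucket_for_user_py_alt
  simp only [tokens_eq]
  exact loops_eq _ titles

-- ===== VERDICT (by name: the statement is the Claim_ definition above) =====
theorem score_bucket_for_user_py_spec : Claim_equal_score_bucket_for_user_py := by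
  intro bucket titles _
  exact score_eq bucket titles
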